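-- pv_equiv track=rewrite | github.com/pypi-data/pypi-mirror-402 | packages/hpe-storage-flowkit/hpe_storage_flowkit-0.1-py2.py3-none-any.whl/hpe_storage_flowkit/src/utils/host_utils.py | prepare_iqn_wwn_queryurl
-- ===== SOURCE A (Python) =====
-- def prepare_iqn_wwn_queryurl(iqns=None, wwns=None):
--     """Prepare query URL parameters for iSCSI names and WWNs.
--
--     Returns a string suitable for appending to a URL.
--     """
--     wwnsQuery = ''
--     if wwns:
--         tmpQuery = []
--         for wwn in wwns:
--             tmpQuery.append('wwn==%s' % wwn)
--         wwnsQuery = 'FCPaths[%s]' % ' OR '.join(tmpQuery)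
--
--     iqnsQuery = ''
--     if iqns:
--         tmpQuery = []
--         for iqn in iqns:
--             tmpQuery.append('name==%s' % iqn)
--         iqnsQuery = 'iSCSIPaths[%s]' % ' OR '.join(tmpQuery)
--
--     query = ''
--     if wwnsQuery and iqnsQuery:
--         query = '%s OR %s' % (wwnsQuery, iqnsQuery)
--     elif wwnsQuery:
--         query = wwnsQuery
--     elif iqnsQuery:
--         query = iqnsQuery
--
--     query = '"%s"' % query if query else ''
--
--     return query
-- ===== SOURCE B (Python) =====
-- def prepare_iqn_wwn_queryurl(iqns=None, wwns=None):
--     """Prepare query URL parameters for iSCSI names and WWNs.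
--
--     Returns a string suitable for appending to a URL.
--     """
--     q = ''
--     if wwns:
--         q = 'FCPaths[wwn==' + wwns[0]
--         for w in wwns[1:]:
--             q += ' OR wwn==' + w
--         q += ']'
--     if iqns:
--         if q:
--             q += ' OR '
--         q += 'iSCSIPaths[name==' + iqns[0]
--         for n in iqns[1:]:
--             q += ' OR name==' + n
--         q += ']'
--     return '"' + q + '"' if q else ''
-- ===== Notes on version B (the rewrite author's own statement) =====
-- stated objective: alternative
-- what changed: Instead of materializing per-list clause lists, joining each, and combining via a three-way if/elif, B streams everything into a single string accumulator: it seeds the clause with the head element (items[0]) and appends ' OR field==x' for each remaining element, inserting the section separator only when the accumulator is non-empty.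
import Mathlib
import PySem

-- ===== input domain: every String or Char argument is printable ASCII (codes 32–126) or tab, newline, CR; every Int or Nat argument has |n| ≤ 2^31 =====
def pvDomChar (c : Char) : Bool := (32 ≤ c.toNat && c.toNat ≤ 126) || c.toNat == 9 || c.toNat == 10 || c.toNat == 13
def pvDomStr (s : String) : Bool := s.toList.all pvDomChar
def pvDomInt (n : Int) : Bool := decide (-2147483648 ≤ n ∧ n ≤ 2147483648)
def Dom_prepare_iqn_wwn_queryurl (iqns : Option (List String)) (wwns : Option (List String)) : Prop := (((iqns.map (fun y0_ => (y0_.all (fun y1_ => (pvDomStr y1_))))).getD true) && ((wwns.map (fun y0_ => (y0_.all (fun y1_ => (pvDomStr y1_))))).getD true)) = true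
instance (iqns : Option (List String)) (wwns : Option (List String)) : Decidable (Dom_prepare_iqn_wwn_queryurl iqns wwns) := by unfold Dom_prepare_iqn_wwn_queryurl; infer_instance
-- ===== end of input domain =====

-- B drops the build-clause-lists-then-join staging: it streams every fragment into one
-- string accumulator, splitting off the head element so no join is needed (objective: simpler).
-- ===== PORT A =====
def prepare_iqn_wwn_queryurl (iqns : Option (List String)) (wwns : Option (List String)) : String :=
  -- wwnsQuery block
  let wwnsQuery : String :=
    if !(wwns.getD []).isEmpty then
      let tmpQuery := (wwns.getD []).foldl (fun acc wwn => acc ++ ["wwn==" ++ wwn]) []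
      "FCPaths[" ++ PySem.Str.join " OR " tmpQuery ++ "]"
    else ""
  -- iqnsQuery block
  let iqnsQuery : String :=
    if !(iqns.getD []).isEmpty then
      let tmpQuery := (iqns.getD []).foldl (fun acc iqn => acc ++ ["name==" ++ iqn]) []
      "iSCSIPaths[" ++ PySem.Str.join " OR " tmpQuery ++ "]"
    else ""
  -- three-way combiner
  let query : String :=
    if !wwnsQuery.toList.isEmpty && !iqnsQuery.toList.isEmpty then
      wwnsQuery ++ " OR " ++ iqnsQuery
    else if !wwnsQuery.toList.isEmpty then wwnsQuery
    else if !iqnsQuery.toList.isEmpty then iqnsQuery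
    else ""
  if !query.toList.isEmpty then "\"" ++ query ++ "\"" else ""

-- ===== PORT B =====
-- single string accumulator q; 'if wwns:' with wwns[0]/wwns[1:] becomes a match on the list
def prepare_iqn_wwn_queryurl_alt (iqns : Option (List String)) (wwns : Option (List String)) : String :=
  let q : String :=
    match wwns.getD [] with
    | [] => ""
    | w0 :: ws =>
      (ws.foldl (fun q w => q ++ " OR wwn==" ++ w) ("FCPaths[wwn==" ++ w0)) ++ "]"
  let q : String :=
    match iqns.getD [] with
    | [] => q
    | n0 :: ns =>
      let q := if !q.toList.isEmpty then q ++ " OR " else q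
      (ns.foldl (fun q n => q ++ " OR name==" ++ n) (q ++ "iSCSIPaths[name==" ++ n0)) ++ "]"
  if !q.toList.isEmpty then "\"" ++ q ++ "\"" else ""

-- ===== PRECONDITION & SPEC =====
def Spec_prepare_iqn_wwn_queryurl (iqns : Option (List String)) (wwns : Option (List String)) (out : String) : Prop := out = prepare_iqn_wwn_queryurl_alt iqns wwns
instance (iqns : Option (List String)) (wwns : Option (List String)) (out : String) : Decidable (Spec_prepare_iqn_wwn_queryurl iqns wwns out) := by unfold Spec_prepare_iqn_wwn_queryurl; infer_instance

-- ===== CLAIM =====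
def Claim_equal_prepare_iqn_wwn_queryurl : Prop := ∀ (iqns : Option (List String)) (wwns : Option (List String)), Dom_prepare_iqn_wwn_queryurl iqns wwns → Spec_prepare_iqn_wwn_queryurl iqns wwns (prepare_iqn_wwn_queryurl iqns wwns)

-- ===== LEMMAS AND PROOFS =====
-- the separator-prefixed tail of a clause (char-list level): what B's inner fold appends after the head
def pvTailL (sep : List Char) : List (List Char) → List Char
  | [] => []
  | y :: ys => sep ++ y ++ pvTailL sep ys

theorem pv_fold_gen (C : String) (xs : List String) : ∀ (s : String),
    (xs.foldl (fun q x => q ++ C ++ x) s).toList =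
      s.toList ++ pvTailL C.toList (xs.map String.toList) := by
  induction xs with
  | nil => intro s; simp [pvTailL]
  | cons a t ih =>
    intro s
    simp only [List.foldl_cons, List.map_cons, pvTailL, ih]
    simp [List.append_assoc]

theorem pv_join_tailL (sep : List Char) : ∀ (ys : List (List Char)) (y : List Char),
    PySem.Chars.join sep (y :: ys) = y ++ pvTailL sep ys := by
  intro ys
  induction ys with
  | nil => intro y; simp [PySem.Chars.join_singleton, pvTailL]
  | cons b t ih =>
    intro y
    simp [PySem.Chars.join_cons_cons, pvTailL, ih b, List.append_assoc]

theorem pvTailL_fuse (sep : List Char) (fld : String) (xs : List String) :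
    pvTailL sep (xs.map (String.toList ∘ (fun x => fld ++ x))) =
      pvTailL (sep ++ fld.toList) (xs.map String.toList) := by
  induction xs with
  | nil => rfl
  | cons a t ih => simp [pvTailL, ih, List.append_assoc]

theorem pv_flat {α β : Type} (f : α → β) (xs : List α) :
    (List.map (fun x => [f x]) xs).flatten = List.map f xs := by
  induction xs with
  | nil => simp
  | cons a t ih => simp [ih]

-- ===== VERDICT =====
theorem prepare_iqn_wwn_queryurl_spec : Claim_equal_prepare_iqn_wwn_queryurl := by
  intro iqns wwns _
  unfold Spec_prepare_iqn_wwn_queryurl prepare_iqn_wwn_queryurl prepare_iqn_wwn_queryurl_alt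
  rcases hw : wwns.getD [] with _ | ⟨w0, ws⟩ <;> rcases hi : iqns.getD [] with _ | ⟨n0, ns⟩ <;>
    simp [pv_flat] <;>
    rw [← String.toList_inj] <;>
    simp [pv_fold_gen, PySem.Str.toList_join, pv_join_tailL,
      List.map_map, pvTailL_fuse, List.append_assoc]
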